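-- pv_equiv track=rewrite | github.com/tyleraland/Euler | pe59.py | freq_check
-- ===== SOURCE A (Python) =====
-- import string
--
-- def freq_check(text):
--     charCount = {x:0 for x in string.ascii_lowercase}
--     for l in text:
--         try: charCount[l] += 1
--         except Exception: pass
--     fq = sorted(charCount.items(), key=lambda tup: tup[1], reverse=True)
--     top = [t[0] for t in fq[:7]]
--     if ('e' in top) and ('a' in top) and ('t' in top) and ('o' in top) and ('i' in top):
--         return True
--     return False
-- ===== SOURCE B (Python) =====
-- import string
--
--
-- def freq_check(text):
--     # Count each lowercase letter (characters outside a-z are ignored).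
--     n = {c: sum(1 for ch in text if ch == c) for c in string.ascii_lowercase}
--     # Instead of sorting, compute each query letter's rank in the
--     # (count descending, letter ascending) order and require rank < 7.
--     return all(
--         sum(1 for c in string.ascii_lowercase
--             if n[c] > n[q] or (n[c] == n[q] and c < q)) < 7
--         for q in "eatoi")
-- ===== Notes on version B (the rewrite author's own statement) =====
-- stated objective: alternative
-- what changed: B never sorts: it counts each letter directly and, for each of the five query letters, computes its rank under (count desc, letter asc) by counting the letters that would precede it, requiring every rank < 7; A builds a dict in one pass, stable-reverse-sorts the 26 items and tests membership in the top 7.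
import Mathlib
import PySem

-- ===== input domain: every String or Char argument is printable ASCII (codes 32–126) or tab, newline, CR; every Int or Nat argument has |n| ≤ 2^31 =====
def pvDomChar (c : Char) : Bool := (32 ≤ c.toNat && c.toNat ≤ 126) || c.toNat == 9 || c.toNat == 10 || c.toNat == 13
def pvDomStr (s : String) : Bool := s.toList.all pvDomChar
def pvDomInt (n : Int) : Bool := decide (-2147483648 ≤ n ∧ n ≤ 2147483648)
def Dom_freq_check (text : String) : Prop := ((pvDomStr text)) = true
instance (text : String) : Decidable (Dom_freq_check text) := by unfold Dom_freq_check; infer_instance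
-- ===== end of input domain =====

-- B replaces A's stable reverse sort of the 26 (letter, count) items by a direct
-- rank computation per query letter (no sort); objective: alternative algorithm.

-- string.ascii_lowercase
def pvAbc : List Char := "abcdefghijklmnopqrstuvwxyz".toList

-- ===== PORT A =====
def freq_check (text : String) : Bool :=
  -- charCount = {x: 0 for x in string.ascii_lowercase}
  let charCount0 := pvAbc.foldl (fun d x => d.insert x (0 : Int)) PySem.Dict.empty
  -- for l in text: try charCount[l] += 1 except: pass
  let charCount := text.toList.foldl
    (fun d l => match d.get? l with
      | some v => d.insert l (v + 1)
      | none => d) charCount0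
  -- fq = sorted(charCount.items(), key=lambda tup: tup[1], reverse=True)
  let fq := PySem.List.sorted charCount.items (fun tup => tup.2) true
  -- top = [t[0] for t in fq[:7]]
  let top := (PySem.List.slice fq none (some 7)).map (fun t => t.1)
  if top.contains 'e' && top.contains 'a' && top.contains 't' && top.contains 'o'
      && top.contains 'i' then true else false

-- ===== PORT B =====
def freq_check_alt (text : String) : Bool :=
  -- n = {c: sum(1 for ch in text if ch == c) for c in string.ascii_lowercase}
  let n := pvAbc.foldl (fun d c => d.insert c ((text.toList.count c : Int))) PySem.Dict.empty
  -- all(sum(1 for c in ascii_lowercase if n[c] > n[q] or (n[c] == n[q] and c < q)) < 7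
  --     for q in "eatoi")
  ("eatoi".toList).all (fun q =>
    pvAbc.countP (fun c =>
      decide (n.getD c 0 > n.getD q 0 ∨ (n.getD c 0 = n.getD q 0 ∧ c < q))) < 7)

-- ===== PRECONDITION & SPEC =====
def Spec_freq_check (text : String) (out : Bool) : Prop := out = freq_check_alt text
instance (text : String) (out : Bool) : Decidable (Spec_freq_check text out) := by unfold Spec_freq_check; infer_instance

-- ===== CLAIM (what is proved, stated in full; the proofs are below) =====
def Claim_equal_freq_check : Prop := ∀ (text : String), Dom_freq_check text → Spec_freq_check text (freq_check text)

-- ===== LEMMAS AND PROOFS =====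

def pvRb (p q : Char × Int) : Bool := decide (q.2 < p.2 ∨ (p.2 = q.2 ∧ p.1 < q.1))

theorem pvRb_iff (p q : Char × Int) : pvRb p q = true ↔ (q.2 < p.2 ∨ (p.2 = q.2 ∧ p.1 < q.1)) := by
  simp [pvRb]

theorem pvRb_irrefl (a : Char × Int) : pvRb a a = false := by
  simp [pvRb]

theorem pvRb_asym {a b : Char × Int} (h : pvRb a b = true) : pvRb b a = false := by
  rw [pvRb_iff] at h
  rw [Bool.eq_false_iff, Ne, pvRb_iff]
  intro hc
  rcases h with h | ⟨h1, h2⟩ <;> rcases hc with hc | ⟨hc1, hc2⟩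
  · omega
  · omega
  · omega
  · exact absurd hc2 (lt_asymm h2)

theorem pv_insertBy_pairwise (x : Char × Int) :
    ∀ (acc : List (Char × Int)), acc.Pairwise (fun a b => pvRb a b = true) →
    (∀ p ∈ acc, p.1 < x.1) →
    (PySem.List.insertBy (fun a b => decide (b.2 < a.2)) x acc).Pairwise (fun a b => pvRb a b = true) := by
  intro acc
  induction acc with
  | nil => intro _ _; simp [PySem.List.insertBy]
  | cons y ys ih =>
    intro hp hch
    rw [List.pairwise_cons] at hp
    obtain ⟨hy, hys⟩ := hp
    by_cases hb : (y.2 < x.2)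
    · have : PySem.List.insertBy (fun a b => decide (b.2 < a.2)) x (y :: ys) = x :: y :: ys := by
        simp [PySem.List.insertBy, hb]
      rw [this]
      constructor
      · intro z hz
        rcases List.mem_cons.mp hz with hz | hz
        · subst hz; rw [pvRb_iff]; left; exact hb
        · have hyz := (pvRb_iff y z).mp (hy z hz)
          rw [pvRb_iff]
          rcases hyz with h | ⟨h1, h2⟩
          · left; exact lt_trans h hb
          · left; omega
      · exact List.pairwise_cons.mpr ⟨hy, hys⟩
    · have : PySem.List.insertBy (fun a b => decide (b.2 < a.2)) x (y :: ys) =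
          y :: PySem.List.insertBy (fun a b => decide (b.2 < a.2)) x ys := by
        simp [PySem.List.insertBy, hb]
      rw [this]
      constructor
      · intro z hz
        rw [PySem.List.mem_insertBy] at hz
        rcases hz with hz | hz
        · subst hz
          rw [pvRb_iff]
          rcases lt_or_eq_of_le (not_lt.mp hb) with h | h
          · left; exact h
          · right; exact ⟨h.symm, hch y (by simp)⟩
        · exact hy z hz
      · exact ih hys (fun p hp => hch p (by simp [hp]))

theorem pv_foldl_pairwise :
    ∀ (l acc : List (Char × Int)), acc.Pairwise (fun a b => pvRb a b = true) →
    l.Pairwise (fun a b => a.1 < b.1) →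
    (∀ p ∈ acc, ∀ q ∈ l, p.1 < q.1) →
    (l.foldl (fun acc x => PySem.List.insertBy (fun a b => decide (b.2 < a.2)) x acc) acc).Pairwise
      (fun a b => pvRb a b = true) := by
  intro l
  induction l with
  | nil => intro acc h _ _; exact h
  | cons x xs ih =>
    intro acc hacc hl hcross
    rw [List.pairwise_cons] at hl
    simp only [List.foldl_cons]
    apply ih
    · exact pv_insertBy_pairwise x acc hacc (fun p hp => hcross p hp x (by simp))
    · exact hl.2
    · intro p hp q hq
      rw [PySem.List.mem_insertBy] at hp
      rcases hp with hp | hp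
      · subst hp; exact hl.1 q hq
      · exact hcross p hp q (by simp [hq])

theorem pv_sorted_pairwise (f : Char → Int) :
    (PySem.List.sorted (pvAbc.map (fun c => (c, f c))) (fun t => t.2) true).Pairwise
      (fun a b => pvRb a b = true) := by
  rw [PySem.List.sorted_rev_eq_foldl_insertBy]
  apply pv_foldl_pairwise
  · exact List.Pairwise.nil
  · rw [List.pairwise_map]
    have : pvAbc.Pairwise (· < ·) := by decide
    exact this
  · intro p hp; simp at hp
  
-- membership in take n ↔ fewer than n elements strictly before x
theorem pv_mem_take_iff :
    ∀ (ys : List (Char × Int)) (x : Char × Int) (n : Nat),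
    ys.Pairwise (fun a b => pvRb a b = true) → x ∈ ys → ys.Nodup →
    (x ∈ ys.take n ↔ ys.countP (fun y => pvRb y x) < n) := by
  intro ys
  induction ys with
  | nil => intro x n _ hx _; simp at hx
  | cons y t ih =>
    intro x n hp hx hnd
    rw [List.pairwise_cons] at hp
    obtain ⟨hy, ht⟩ := hp
    rw [List.nodup_cons] at hnd
    by_cases hxy : x = y
    · subst hxy
      have hcnt : (x :: t).countP (fun y => pvRb y x) = 0 := by
        rw [List.countP_cons]
        have h0 : t.countP (fun z => pvRb z x) = 0 :=
          List.countP_eq_zero.mpr (fun z hz => by simp [pvRb_asym (hy z hz)])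
        simp [pvRb_irrefl, h0]
      rw [hcnt]
      cases n with
      | zero => simp
      | succ m => simp
    · have hxt : x ∈ t := (List.mem_cons.mp hx).resolve_left hxy
      have hcnt : (y :: t).countP (fun z => pvRb z x) = t.countP (fun z => pvRb z x) + 1 := by
        rw [List.countP_cons]
        simp [hy x hxt]
      rw [hcnt]
      cases n with
      | zero => simp
      | succ m =>
        rw [List.take_succ_cons]
        rw [List.mem_cons]
        constructor
        · intro h
          rcases h with h | h
          · exact absurd h hxy
          · have := (ih x m ht hxt hnd.2).mp h; omega
        · intro h
          right
          exact (ih x m ht hxt hnd.2).mpr (by omega)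

theorem pv_abc_nodup : pvAbc.Nodup := by decide

theorem pv_top_iff (f : Char → Int) (q : Char) (hq : q ∈ pvAbc) :
    (q ∈ ((PySem.List.sorted (pvAbc.map (fun c => (c, f c))) (fun t => t.2) true).take 7).map (fun t => t.1))
      ↔ pvAbc.countP (fun c => pvRb (c, f c) (q, f q)) < 7 := by
  set xs := pvAbc.map (fun c => (c, f c)) with hxs
  set ys := PySem.List.sorted xs (fun t => t.2) true with hys
  have hperm : ys.Perm xs := PySem.List.sorted_perm xs (fun t => t.2) true
  have hinj : Function.Injective (fun c => (c, f c) : Char → Char × Int) := by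
    intro a b h; exact congrArg Prod.fst h
  have hnodup : ys.Nodup := (hperm.nodup_iff).mpr (pv_abc_nodup.map hinj)
  have hxq : (q, f q) ∈ ys := hperm.mem_iff.mpr (List.mem_map.mpr ⟨q, hq, rfl⟩)
  have hpair : ys.Pairwise (fun a b => pvRb a b = true) := pv_sorted_pairwise f
  have hshape : ∀ p ∈ ys, p = (p.1, f p.1) := by
    intro p hp
    have := hperm.mem_iff.mp hp
    rw [hxs, List.mem_map] at this
    obtain ⟨c, _, hc⟩ := this
    rw [← hc]
  have hmem : q ∈ (ys.take 7).map Prod.fst ↔ (q, f q) ∈ ys.take 7 := by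
    constructor
    · intro h
      rw [List.mem_map] at h
      obtain ⟨p, hp, hp1⟩ := h
      have := hshape p (List.mem_of_mem_take hp)
      rw [this, hp1] at hp
      exact hp
    · intro h
      exact List.mem_map.mpr ⟨(q, f q), h, rfl⟩
  rw [hmem, pv_mem_take_iff ys (q, f q) 7 hpair hxq hnodup,
    hperm.countP_eq, hxs, List.countP_map]
  rfl

theorem pv_d0_items :
    (pvAbc.foldl (fun d x => d.insert x (0 : Int)) PySem.Dict.empty).items
      = pvAbc.map (fun c => (c, (0 : Int))) := by
  have h := PySem.Dict.items_foldl_insert_fresh pvAbc (fun a => a) (fun _ => (0 : Int))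
    (PySem.Dict.empty (κ := Char) (ν := Int))
    (by intro a _; simp [PySem.Dict.contains_empty]) (by simpa using pv_abc_nodup)
  simpa using h

theorem pv_loop (l : List Char) :
    ∀ (d : PySem.Dict Char Int), d.keys = pvAbc →
    ((l.foldl (fun (d : PySem.Dict Char Int) l => match d.get? l with | some v => d.insert l (v + 1) | none => d) d).keys = pvAbc
      ∧ ∀ c ∈ pvAbc, (l.foldl (fun (d : PySem.Dict Char Int) l => match d.get? l with | some v => d.insert l (v + 1) | none => d) d).getD c 0
          = d.getD c 0 + (l.count c : Int)) := by
  induction l with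
  | nil => intro d hk; exact ⟨hk, fun c _ => by simp⟩
  | cons x xs ih =>
    intro d hk
    simp only [List.foldl_cons]
    cases hg : d.get? x with
    | none =>
      have hxk : x ∉ pvAbc := by
        rw [← hk]; exact (PySem.Dict.get?_eq_none_iff_not_mem_keys d x).mp hg
      obtain ⟨ihk, ihg⟩ := ih d hk
      refine ⟨ihk, fun c hc => ?_⟩
      have hne : ¬ (x == c) := by
        intro h; exact hxk (by rwa [← eq_of_beq h] at hc)
      rw [ihg c hc, List.count_cons]
      simp [hne]
    | some v =>
      have hcont : d.contains x = true := by
        rw [PySem.Dict.contains_eq_isSome_get?, hg]; rfl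
      have hk' : (d.insert x (v + 1)).keys = pvAbc := by
        rw [PySem.Dict.keys_insert_of_contains d (v + 1) hcont, hk]
      obtain ⟨ihk, ihg⟩ := ih (d.insert x (v + 1)) hk'
      refine ⟨ihk, fun c hc => ?_⟩
      rw [ihg c hc, PySem.Dict.getD_insert, List.count_cons]
      by_cases hcx : c = x
      · subst hcx
        rw [PySem.Dict.getD_of_get?_eq_some d 0 hg]
        simp
        omega
      · have : ¬ (x == c) := fun h => hcx (eq_of_beq h).symm
        simp [hcx, this]

theorem pv_A_items (text : String) :
    ((text.toList.foldl (fun (d : PySem.Dict Char Int) l => match d.get? l with | some v => d.insert l (v + 1) | none => d)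
        (pvAbc.foldl (fun d x => d.insert x (0 : Int)) PySem.Dict.empty)).items)
      = pvAbc.map (fun c => (c, (text.toList.count c : Int))) := by
  set d0 := pvAbc.foldl (fun d x => d.insert x (0 : Int)) PySem.Dict.empty with hd0
  have hk0 : d0.keys = pvAbc := by
    show d0.items.map Prod.fst = pvAbc
    rw [pv_d0_items]
    simp [Function.comp_def]
  have hg0 : ∀ c ∈ pvAbc, d0.getD c 0 = 0 := by
    intro c hc
    exact PySem.Dict.getD_of_mem_items d0
      (by rw [pv_d0_items]; exact List.mem_map.mpr ⟨c, hc, rfl⟩) (by rw [hk0]; exact pv_abc_nodup) 0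
  obtain ⟨hk, hg⟩ := pv_loop text.toList d0 hk0
  set d := text.toList.foldl (fun (d : PySem.Dict Char Int) l => match d.get? l with | some v => d.insert l (v + 1) | none => d) d0
  rw [PySem.Dict.items_eq_map_keys d (by rw [hk]; exact pv_abc_nodup) 0, hk]
  apply List.map_congr_left
  intro c hc
  rw [hg c hc, hg0 c hc]
  simp

theorem pv_B_items (text : String) :
    (pvAbc.foldl (fun d c => d.insert c ((text.toList.count c : Int))) PySem.Dict.empty).items
      = pvAbc.map (fun c => (c, (text.toList.count c : Int))) := by
  have h := PySem.Dict.items_foldl_insert_fresh pvAbc (fun a => a)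
    (fun c => (text.toList.count c : Int)) (PySem.Dict.empty (κ := Char) (ν := Int))
    (by intro a _; simp [PySem.Dict.contains_empty]) (by simpa using pv_abc_nodup)
  simpa using h

theorem pv_B_keys (text : String) :
    (pvAbc.foldl (fun d c => d.insert c ((text.toList.count c : Int))) PySem.Dict.empty).keys
      = pvAbc := by
  show (pvAbc.foldl (fun d c => d.insert c ((text.toList.count c : Int))) PySem.Dict.empty).items.map Prod.fst = pvAbc
  rw [pv_B_items]
  simp [Function.comp_def]

theorem pv_B_getD (text : String) (q : Char) (hq : q ∈ pvAbc) :
    (pvAbc.foldl (fun d c => d.insert c ((text.toList.count c : Int))) PySem.Dict.empty).getD q 0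
      = (text.toList.count q : Int) := by
  apply PySem.Dict.getD_of_mem_items
  · rw [pv_B_items]
    exact List.mem_map.mpr ⟨q, hq, rfl⟩
  · rw [pv_B_keys]
    exact pv_abc_nodup

theorem pv_main (text : String) : freq_check text = freq_check_alt text := by
  simp only [freq_check, freq_check_alt, pv_A_items,
    PySem.List.slice_to _ (by norm_num : (0:Int) ≤ 7)]
  rw [show "eatoi".toList = ['e','a','t','o','i'] from rfl]
  simp only [List.all_cons, List.all_nil]
  have hf : ∀ q : Char, q ∈ pvAbc →
      ((List.map (fun t : Char × Int => t.1) (List.take (Int.toNat 7)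
          (PySem.List.sorted (List.map (fun c => (c, ((text.toList.count c : Int)))) pvAbc)
            (fun tup => tup.2) true))).contains q)
        = decide (pvAbc.countP
            (fun c => pvRb (c, (text.toList.count c : Int)) (q, (text.toList.count q : Int))) < 7) := by
    intro q hq
    have h := pv_top_iff (fun c => (text.toList.count c : Int)) q hq
    rw [show ((List.map (fun t : Char × Int => t.1) (List.take (Int.toNat 7)
          (PySem.List.sorted (List.map (fun c => (c, ((text.toList.count c : Int)))) pvAbc)
            (fun tup => tup.2) true))).contains q)
        = decide (q ∈ (List.map (fun t : Char × Int => t.1) (List.take (Int.toNat 7)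
          (PySem.List.sorted (List.map (fun c => (c, ((text.toList.count c : Int)))) pvAbc)
            (fun tup => tup.2) true)))) by simp]
    exact decide_eq_decide.mpr h
  have hg : ∀ q : Char, q ∈ pvAbc →
      (List.countP (fun c =>
          decide ((pvAbc.foldl (fun d c => d.insert c ((text.toList.count c : Int))) PySem.Dict.empty).getD c 0
              > (pvAbc.foldl (fun d c => d.insert c ((text.toList.count c : Int))) PySem.Dict.empty).getD q 0
            ∨ ((pvAbc.foldl (fun d c => d.insert c ((text.toList.count c : Int))) PySem.Dict.empty).getD c 0
              = (pvAbc.foldl (fun d c => d.insert c ((text.toList.count c : Int))) PySem.Dict.empty).getD q 0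
              ∧ c < q))) pvAbc)
        = pvAbc.countP
            (fun c => pvRb (c, (text.toList.count c : Int)) (q, (text.toList.count q : Int))) := by
    intro q hq
    apply List.countP_congr
    intro c hc
    rw [pv_B_getD text c hc, pv_B_getD text q hq]
    simp [pvRb]
  rw [hf 'e' (by decide), hf 'a' (by decide), hf 't' (by decide), hf 'o' (by decide),
    hf 'i' (by decide), hg 'e' (by decide), hg 'a' (by decide), hg 't' (by decide),
    hg 'o' (by decide), hg 'i' (by decide)]
  simp [Bool.and_assoc]

-- ===== VERDICT (by name: the statement is the Claim_ definition above) =====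
theorem freq_check_spec : Claim_equal_freq_check := by
  unfold Claim_equal_freq_check Spec_freq_check
  intro text _
  exact pv_main text
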